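-- pv_equiv track=rewrite | github.com/vovikilelik/pd-29 | share/dataset_utils/lib/csv/lib/simple_line_parser.py | read_chars
-- ===== SOURCE A (Python) =====
-- QUOTES = ['"', '\'']
--
-- def read_chars(text: str):
--     last_quote = None
--     start = 0
--
--     for i in range(len(text)):
--         char = text[i]
--
--         if last_quote is None:
--             if char in QUOTES:
--                 last_quote = char
--                 start = i + 1
--             else:
--                 yield i, i + 1
--
--         elif char == last_quote:
--             last_quote = None
--             yield start, i
-- ===== SOURCE B (Python) =====
-- def read_chars(text: str):
--     i = 0
--     n = len(text)
--     while i < n: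
--         ch = text[i]
--         if ch in ('"', "'"):
--             j = text.find(ch, i + 1)
--             if j == -1:
--                 return
--             yield i + 1, j
--             i = j + 1
--         else:
--             yield i, i + 1
--             i += 1
-- ===== Notes on version B (the rewrite author's own statement) =====
-- stated objective: alternative
-- what changed: Replaced A's single-pass last_quote/start state machine over every character by an explicit-index while loop that, on a quote, finds the matching close quote with str.find and jumps past the whole quoted span.
import Mathlib
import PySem

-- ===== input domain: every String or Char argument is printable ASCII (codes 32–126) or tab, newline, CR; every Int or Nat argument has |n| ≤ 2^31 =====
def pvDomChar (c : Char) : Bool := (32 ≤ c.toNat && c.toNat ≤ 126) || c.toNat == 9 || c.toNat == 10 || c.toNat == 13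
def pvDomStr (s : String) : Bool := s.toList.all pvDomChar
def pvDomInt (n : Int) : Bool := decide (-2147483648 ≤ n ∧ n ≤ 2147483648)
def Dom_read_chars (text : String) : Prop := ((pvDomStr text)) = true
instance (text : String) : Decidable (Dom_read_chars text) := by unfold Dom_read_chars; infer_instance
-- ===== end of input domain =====

-- B replaces A's persistent last_quote state machine by index-jumping: on a quote it
-- searches for the matching close quote and skips the whole quoted span (objective: alternative).

-- ===== PORT A =====
-- QUOTES = ['"', '\'']
def QUOTES : List Char := ['"', '\'']

-- A's for-loop over range(len(text)) with state (last_quote, start), yielding spans in order.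
def readCharsGo : List Char → Int → Option Char → Int → List (Int × Int)
  | [], _, _, _ => []
  | c :: rest, i, lastQuote, start =>
    match lastQuote with
    | none =>
      if c ∈ QUOTES then readCharsGo rest (i + 1) (some c) (i + 1)
      else (i, i + 1) :: readCharsGo rest (i + 1) none start
    | some q =>
      if c = q then (start, i) :: readCharsGo rest (i + 1) none start
      else readCharsGo rest (i + 1) (some q) start

def read_chars (text : String) : List (Int × Int) :=
  readCharsGo text.toList 0 none 0

-- ===== PORT B =====
-- B's while loop with explicit index i; text.find(ch, i+1) is ported exactly as the first
-- occurrence of ch in the remaining suffix (List.idxOf?), offset by i+1.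
def readCharsAltGo : List Char → Int → List (Int × Int)
  | [], _ => []
  | c :: rest, i =>
    if c ∈ QUOTES then
      match List.idxOf? c rest with
      | none => []
      | some k => (i + 1, i + 1 + (k : Int)) :: readCharsAltGo (rest.drop (k + 1)) (i + 1 + (k : Int) + 1)
    else (i, i + 1) :: readCharsAltGo rest (i + 1)
  termination_by l _ => l.length
  decreasing_by
    · simp
    · simp

def read_chars_alt (text : String) : List (Int × Int) :=
  readCharsAltGo text.toList 0

-- ===== PRECONDITION & SPEC =====
def Spec_read_chars (text : String) (out : List (Int × Int)) : Prop := out = read_chars_alt text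
instance (text : String) (out : List (Int × Int)) : Decidable (Spec_read_chars text out) := by unfold Spec_read_chars; infer_instance

-- ===== CLAIM (what is proved, stated in full; the proofs are below) =====
def Claim_equal_read_chars : Prop := ∀ (text : String), Dom_read_chars text → Spec_read_chars text (read_chars text)

-- ===== LEMMAS AND PROOFS =====

-- Joint invariant: in the none-state A's machine agrees with B's loop; in the some-q state
-- A's machine produces the span up to the first occurrence of q and then behaves like B's loop
-- after the jump.
theorem idxOf?_cons_eq {c q : Char} {rest : List Char} :
    List.idxOf? q (c :: rest) =
      if c = q then some 0 else (List.idxOf? q rest).map (· + 1) := by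
  by_cases h : c = q <;> simp [List.idxOf?, List.findIdx?_cons, h, Ne.symm]

theorem readCharsGo_eq (l : List Char) :
    ∀ (i start : Int) (q : Char),
      readCharsGo l i none start = readCharsAltGo l i ∧
      readCharsGo l i (some q) start =
        (match List.idxOf? q l with
         | none => []
         | some k => (start, i + (k : Int)) :: readCharsAltGo (l.drop (k + 1)) (i + (k : Int) + 1)) := by
  induction l with
  | nil => intro i start q; simp [readCharsGo, readCharsAltGo, List.idxOf?]
  | cons c rest ih =>
    intro i start q
    constructor
    · by_cases hq : c ∈ QUOTES
      · rw [readCharsGo, readCharsAltGo]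
        simp only [hq, if_pos]
        rw [(ih (i + 1) (i + 1) c).2]
      · rw [readCharsGo, readCharsAltGo]
        simp only [hq, if_neg, not_false_iff]
        rw [(ih (i + 1) start q).1]
    · rw [readCharsGo, idxOf?_cons_eq]
      by_cases hc : c = q
      · simp only [hc]
        simpa using (ih (i + 1) start q).1
      · simp only [if_neg hc]
        rw [(ih (i + 1) start q).2]
        cases h : List.idxOf? q rest with
        | none => simp
        | some k =>
          simp only [Option.map_some, List.drop_succ_cons]
          have h1 : (i + 1 + (k : Int)) = i + ((k + 1 : Nat) : Int) := by push_cast; ring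
          have h2 : (i + 1 + (k : Int) + 1) = i + ((k + 1 : Nat) : Int) + 1 := by push_cast; ring
          rw [h1]

-- ===== VERDICT (by name: the statement is the Claim_ definition above) =====
theorem read_chars_spec : Claim_equal_read_chars := by
  intro text _
  unfold Spec_read_chars read_chars read_chars_alt
  exact (readCharsGo_eq text.toList 0 0 'x').1
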